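-- pv_equiv track=rewrite | github.com/brianrabern/LogicSkills | Evaluation/countermodel_questions/countermodel_checker.py | merge_smts
-- ===== SOURCE A (Python) =====
-- def extract_declarations(smtlib_str):
--     """
--     Extracts all (declare-...) lines from an SMT-LIB string.
--     Returns a tuple: (list of declarations, list of other lines)
--     """
--     decls = []
--     others = []
--     for line in smtlib_str.strip().splitlines():
--         line = line.strip()
--         if line.startswith("(declare-"):
--             decls.append(line)
--         elif line:  # ignore empty lines
--             others.append(line)
--     return decls, others
--
-- def merge_smts(model_smt, sentence_smt):
--     model_decls, model_rest = extract_declarations(model_smt)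
--     sent_decls, sent_rest = extract_declarations(sentence_smt)
--
--     # combine and dedupe declarations
--     seen = set()
--     all_decls = []
--     for decl in model_decls + sent_decls:
--         if decl not in seen:
--             all_decls.append(decl)
--             seen.add(decl)
--
--     # combine all parts
--     # sort declarations: sort first, then others
--     all_decls_sorted = sorted(all_decls, key=lambda d: 0 if "(declare-sort" in d else 1)
--     return "\n".join(all_decls_sorted + model_rest + sent_rest)
-- ===== SOURCE B (Python) =====
-- def merge_smts(model_smt, sentence_smt):
--     # One pass: shared seen-set, two declaration buckets (no sort), rests per source.
--     seen = set()
--     sort_decls = []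
--     fun_decls = []
--     model_rest = []
--     sent_rest = []
--     for src, rest in ((model_smt, model_rest), (sentence_smt, sent_rest)):
--         for line in src.strip().splitlines():
--             line = line.strip()
--             if line.startswith("(declare-"):
--                 if line not in seen:
--                     seen.add(line)
--                     (sort_decls if "(declare-sort" in line else fun_decls).append(line)
--             elif line:
--                 rest.append(line)
--     return "\n".join(sort_decls + fun_decls + model_rest + sent_rest)
-- ===== Notes on version B (the rewrite author's own statement) =====
-- stated objective: simpler
-- what changed: Replaced the three-phase pipeline (extract per source, dedupe pass, stable sort by a 0/1 key) with a single pass that walks both inputs once, deduping against a shared seen-set and appending each new declaration directly into a sort-decls or fun-decls bucket, so the sorted() call and the intermediate declaration lists disappear.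
import Mathlib
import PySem

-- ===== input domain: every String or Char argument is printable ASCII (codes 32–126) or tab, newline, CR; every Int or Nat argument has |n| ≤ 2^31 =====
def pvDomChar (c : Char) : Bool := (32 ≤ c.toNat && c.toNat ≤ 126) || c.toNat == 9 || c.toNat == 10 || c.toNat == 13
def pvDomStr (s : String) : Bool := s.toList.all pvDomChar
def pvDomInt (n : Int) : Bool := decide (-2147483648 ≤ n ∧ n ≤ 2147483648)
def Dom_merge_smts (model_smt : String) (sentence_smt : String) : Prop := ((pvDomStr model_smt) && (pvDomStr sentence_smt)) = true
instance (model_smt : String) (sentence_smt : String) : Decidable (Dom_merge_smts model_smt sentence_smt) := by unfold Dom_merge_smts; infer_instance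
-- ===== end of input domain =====

-- B replaces A's extract/dedupe/stable-sort pipeline by a single pass with a shared
-- seen-set and two buckets (objective: simpler — the sorted() call and the intermediate
-- declaration lists disappear); the output is proved identical on all of Dom.

-- ===== PORT A =====
-- the loop body of extract_declarations
def pvAstep (acc : List String × List String) (line : String) : List String × List String :=
  let l := PySem.Str.strip line
  if PySem.Str.startswith l "(declare-" then (acc.1 ++ [l], acc.2)
  else if !(l == "") then (acc.1, acc.2 ++ [l])
  else acc

def extract_declarations (smtlib_str : String) : List String × List String :=
  (PySem.Str.splitlines (PySem.Str.strip smtlib_str)).foldl pvAstep ([], [])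

-- the body of A's dedupe loop: 'if decl not in seen: all_decls.append(decl); seen.add(decl)'
def pvDstep (st : PySem.Set String × List String) (d : String) :
    PySem.Set String × List String :=
  if PySem.Set.contains st.1 d then st else (PySem.Set.add st.1 d, st.2 ++ [d])

def merge_smts (model_smt : String) (sentence_smt : String) : String :=
  let m := extract_declarations model_smt
  let s := extract_declarations sentence_smt
  let ded := (m.1 ++ s.1).foldl pvDstep (PySem.Set.empty, [])
  let all_decls_sorted := PySem.List.sorted ded.2
    (fun d => if PySem.Str.isIn "(declare-sort" d then (0 : Int) else 1) false
  PySem.Str.join "\n" (all_decls_sorted ++ m.2 ++ s.2)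

-- ===== PORT B =====
-- one source's inner loop; state (seen, sort_decls, fun_decls, rest)
def mergeB_step (st : PySem.Set String × List String × List String × List String)
    (line : String) : PySem.Set String × List String × List String × List String :=
  let l := PySem.Str.strip line
  if PySem.Str.startswith l "(declare-" then
    if PySem.Set.contains st.1 l then st
    else if PySem.Str.isIn "(declare-sort" l then
      (PySem.Set.add st.1 l, st.2.1 ++ [l], st.2.2.1, st.2.2.2)
    else
      (PySem.Set.add st.1 l, st.2.1, st.2.2.1 ++ [l], st.2.2.2)
  else if !(l == "") then (st.1, st.2.1, st.2.2.1, st.2.2.2 ++ [l])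
  else st

def mergeB_src (seen : PySem.Set String) (sorts funs : List String) (src : String) :
    PySem.Set String × List String × List String × List String :=
  (PySem.Str.splitlines (PySem.Str.strip src)).foldl mergeB_step (seen, sorts, funs, [])

def merge_smts_alt (model_smt : String) (sentence_smt : String) : String :=
  let m := mergeB_src PySem.Set.empty [] [] model_smt
  let s := mergeB_src m.1 m.2.1 m.2.2.1 sentence_smt
  PySem.Str.join "\n" (s.2.1 ++ s.2.2.1 ++ m.2.2.2 ++ s.2.2.2)

-- ===== PRECONDITION & SPEC =====
def Spec_merge_smts (model_smt : String) (sentence_smt : String) (out : String) : Prop := out = merge_smts_alt model_smt sentence_smt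
instance (model_smt : String) (sentence_smt : String) (out : String) : Decidable (Spec_merge_smts model_smt sentence_smt out) := by unfold Spec_merge_smts; infer_instance

-- ===== CLAIM (what is proved, stated in full; the proofs are below) =====
def Claim_equal_merge_smts : Prop := ∀ (model_smt : String) (sentence_smt : String), Dom_merge_smts model_smt sentence_smt → Spec_merge_smts model_smt sentence_smt (merge_smts model_smt sentence_smt)

-- ===== LEMMAS AND PROOFS =====

-- abbreviations used only by the proofs
def pvP (d : String) : Bool := PySem.Str.isIn "(declare-sort" d

def pvSW (l : String) : Bool := PySem.Str.startswith l "(declare-"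

def pvDecls (lines : List String) : List String :=
  (lines.map PySem.Str.strip).filter pvSW

def pvOthers (lines : List String) : List String :=
  (lines.map PySem.Str.strip).filter (fun l => !pvSW l && !(l == ""))

theorem pvAstep_eq (acc : List String × List String) (x : String) :
    pvAstep acc x =
      if pvSW (PySem.Str.strip x) then (acc.1 ++ [PySem.Str.strip x], acc.2)
      else if !(PySem.Str.strip x == "") then (acc.1, acc.2 ++ [PySem.Str.strip x])
      else acc := rfl

theorem pvDecls_cons (x : String) (xs : List String) :
    pvDecls (x :: xs) =
      if pvSW (PySem.Str.strip x) then PySem.Str.strip x :: pvDecls xs else pvDecls xs := by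
  unfold pvDecls
  rw [List.map_cons, List.filter_cons]

theorem pvOthers_cons (x : String) (xs : List String) :
    pvOthers (x :: xs) =
      if !pvSW (PySem.Str.strip x) && !(PySem.Str.strip x == "") then
        PySem.Str.strip x :: pvOthers xs
      else pvOthers xs := by
  unfold pvOthers
  rw [List.map_cons, List.filter_cons]

-- A's extract fold, from an arbitrary accumulator
theorem pvExtract_fold (lines : List String) :
    ∀ (d o : List String),
      lines.foldl pvAstep (d, o) = (d ++ pvDecls lines, o ++ pvOthers lines) := by
  induction lines with
  | nil => intro d o; simp [pvDecls, pvOthers]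
  | cons x xs ih =>
    intro d o
    rw [List.foldl_cons, pvAstep_eq, pvDecls_cons, pvOthers_cons]
    by_cases h1 : pvSW (PySem.Str.strip x) = true
    · rw [if_pos h1, if_pos h1, ih]
      have : (!pvSW (PySem.Str.strip x) && !(PySem.Str.strip x == "")) = false := by
        rw [h1]; rfl
      rw [if_neg (by rw [this]; exact Bool.false_ne_true)]
      simp
    · have h1' : pvSW (PySem.Str.strip x) = false := by
        cases h : pvSW (PySem.Str.strip x) with
        | false => rfl
        | true => exact absurd h h1
      rw [if_neg h1, if_neg h1]
      by_cases h2 : (PySem.Str.strip x == "") = true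
      · have hb : (!(PySem.Str.strip x == "")) = false := by rw [h2]; rfl
        rw [if_neg (by rw [hb]; exact Bool.false_ne_true), ih]
        rw [if_neg (by rw [h1', h2]; exact Bool.false_ne_true)]
      · have h2' : (PySem.Str.strip x == "") = false := by
          cases h : (PySem.Str.strip x == "") with
          | false => rfl
          | true => exact absurd h h2
        have hb : (!(PySem.Str.strip x == "")) = true := by rw [h2']; rfl
        rw [if_pos hb, ih]
        rw [if_pos (by rw [h1', h2']; rfl)]
        simp

theorem pvExtract_eq (s : String) :
    extract_declarations s
      = (pvDecls (PySem.Str.splitlines (PySem.Str.strip s)),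
         pvOthers (PySem.Str.splitlines (PySem.Str.strip s))) := by
  unfold extract_declarations
  rw [pvExtract_fold]
  simp

theorem pvDedup_acc (ds : List String) :
    ∀ (seen : PySem.Set String) (a : List String),
      ds.foldl pvDstep (seen, a)
        = ((ds.foldl pvDstep (seen, [])).1, a ++ (ds.foldl pvDstep (seen, [])).2) := by
  induction ds with
  | nil => intro seen a; simp
  | cons d ds ih =>
    intro seen a
    rw [List.foldl_cons, List.foldl_cons]
    by_cases h : PySem.Set.contains seen d = true
    · rw [show pvDstep (seen, a) d = (seen, a) from by unfold pvDstep; rw [if_pos h],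
          show pvDstep (seen, []) d = (seen, []) from by unfold pvDstep; rw [if_pos h]]
      exact ih seen a
    · rw [show pvDstep (seen, a) d = (PySem.Set.add seen d, a ++ [d]) from by
            unfold pvDstep; rw [if_neg h],
          show pvDstep (seen, []) d = (PySem.Set.add seen d, [] ++ [d]) from by
            unfold pvDstep; rw [if_neg h]]
      rw [ih (PySem.Set.add seen d) (a ++ [d]), ih (PySem.Set.add seen d) ([] ++ [d])]
      simp

-- B's declaration processing (the decl branch of mergeB_step), isolated
def pvBstep (st : PySem.Set String × List String × List String) (l : String) :
    PySem.Set String × List String × List String :=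
  if PySem.Set.contains st.1 l then st
  else if pvP l then (PySem.Set.add st.1 l, st.2.1 ++ [l], st.2.2)
  else (PySem.Set.add st.1 l, st.2.1, st.2.2 ++ [l])

-- B's line fold = decl fold over the decls, rest accumulates the others
theorem pvLines_fold (lines : List String) :
    ∀ (seen : PySem.Set String) (sorts funs rest : List String),
      lines.foldl mergeB_step (seen, sorts, funs, rest)
        = (((pvDecls lines).foldl pvBstep (seen, sorts, funs)).1,
           ((pvDecls lines).foldl pvBstep (seen, sorts, funs)).2.1,
           ((pvDecls lines).foldl pvBstep (seen, sorts, funs)).2.2,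
           rest ++ pvOthers lines) := by
  induction lines with
  | nil => intro seen sorts funs rest; simp [pvDecls, pvOthers]
  | cons x xs ih =>
    intro seen sorts funs rest
    rw [List.foldl_cons, pvDecls_cons, pvOthers_cons]
    by_cases h1 : pvSW (PySem.Str.strip x) = true
    · have hstep : mergeB_step (seen, sorts, funs, rest) x
          = ((pvBstep (seen, sorts, funs) (PySem.Str.strip x)).1,
             (pvBstep (seen, sorts, funs) (PySem.Str.strip x)).2.1,
             (pvBstep (seen, sorts, funs) (PySem.Str.strip x)).2.2,
             rest) := by
        unfold mergeB_step pvBstep pvP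
        rw [if_pos (show PySem.Str.startswith (PySem.Str.strip x) "(declare-" = true from h1)]
        by_cases h2 : PySem.Set.contains seen (PySem.Str.strip x) = true
        · rw [if_pos h2, if_pos h2]
        · rw [if_neg h2, if_neg h2]
          by_cases h3 : PySem.Str.isIn "(declare-sort" (PySem.Str.strip x) = true
          · rw [if_pos h3, if_pos h3]
          · rw [if_neg h3, if_neg h3]
      rw [hstep, if_pos h1, List.foldl_cons,
          if_neg (show ¬ ((!pvSW (PySem.Str.strip x) && !(PySem.Str.strip x == "")) = true) from by
            rw [h1]; exact fun hc => Bool.false_ne_true hc)]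
      rcases hb : pvBstep (seen, sorts, funs) (PySem.Str.strip x) with ⟨s1, s2, s3⟩
      exact ih s1 s2 s3 rest
    · have h1' : pvSW (PySem.Str.strip x) = false := by
        cases h : pvSW (PySem.Str.strip x) with
        | false => rfl
        | true => exact absurd h h1
      rw [if_neg h1]
      by_cases h2 : (PySem.Str.strip x == "") = true
      · have hstep : mergeB_step (seen, sorts, funs, rest) x = (seen, sorts, funs, rest) := by
          unfold mergeB_step
          rw [if_neg (show ¬ (PySem.Str.startswith (PySem.Str.strip x) "(declare-" = true) from h1)]
          rw [if_neg (show ¬ ((!(PySem.Str.strip x == "")) = true) from by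
            rw [h2]; exact fun hc => Bool.false_ne_true hc)]
        rw [hstep, if_neg (show ¬ ((!pvSW (PySem.Str.strip x) && !(PySem.Str.strip x == "")) = true) from by
            rw [h1', h2]; exact fun hc => Bool.false_ne_true hc)]
        exact ih seen sorts funs rest
      · have h2' : (PySem.Str.strip x == "") = false := by
          cases h : (PySem.Str.strip x == "") with
          | false => rfl
          | true => exact absurd h h2
        have hstep : mergeB_step (seen, sorts, funs, rest) x
            = (seen, sorts, funs, rest ++ [PySem.Str.strip x]) := by
          unfold mergeB_step
          rw [if_neg (show ¬ (PySem.Str.startswith (PySem.Str.strip x) "(declare-" = true) from h1)]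
          rw [if_pos (show (!(PySem.Str.strip x == "")) = true from by rw [h2']; rfl)]
        rw [hstep, if_pos (show (!pvSW (PySem.Str.strip x) && !(PySem.Str.strip x == "")) = true from by
            rw [h1', h2']; rfl)]
        rw [ih seen sorts funs (rest ++ [PySem.Str.strip x])]
        simp

-- decl fold = dedupe then partition by pvP
theorem pvBfold_eq (ds : List String) :
    ∀ (seen : PySem.Set String) (sorts funs : List String),
      ds.foldl pvBstep (seen, sorts, funs)
        = ((ds.foldl pvDstep (seen, [])).1,
           sorts ++ (ds.foldl pvDstep (seen, [])).2.filter pvP,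
           funs ++ (ds.foldl pvDstep (seen, [])).2.filter (fun d => !pvP d)) := by
  induction ds with
  | nil => intro seen sorts funs; simp
  | cons d ds ih =>
    intro seen sorts funs
    rw [List.foldl_cons, List.foldl_cons]
    by_cases h : PySem.Set.contains seen d = true
    · rw [show pvBstep (seen, sorts, funs) d = (seen, sorts, funs) from by
            unfold pvBstep; rw [if_pos h],
          show pvDstep (seen, []) d = (seen, []) from by unfold pvDstep; rw [if_pos h]]
      exact ih seen sorts funs
    · rw [show pvDstep (seen, []) d = (PySem.Set.add seen d, [] ++ [d]) from by
            unfold pvDstep; rw [if_neg h]]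
      by_cases hp : pvP d = true
      · rw [show pvBstep (seen, sorts, funs) d
              = (PySem.Set.add seen d, sorts ++ [d], funs) from by
            unfold pvBstep; rw [if_neg h, if_pos hp]]
        rw [ih (PySem.Set.add seen d) (sorts ++ [d]) funs,
            pvDedup_acc ds (PySem.Set.add seen d) ([] ++ [d])]
        simp [hp]
      · have hp' : pvP d = false := by
          cases hh : pvP d with
          | false => rfl
          | true => exact absurd hh hp
        rw [show pvBstep (seen, sorts, funs) d
              = (PySem.Set.add seen d, sorts, funs ++ [d]) from by
            unfold pvBstep; rw [if_neg h, if_neg hp]]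
        rw [ih (PySem.Set.add seen d) sorts (funs ++ [d]),
            pvDedup_acc ds (PySem.Set.add seen d) ([] ++ [d])]
        simp [hp']

-- a stable sort by a two-valued 0/1 key is the partition by the key
theorem pvInsertBy_append_left (before : String → String → Bool) (x : String)
    (a b : List String) (h : ∀ y ∈ a, before x y = false) :
    PySem.List.insertBy before x (a ++ b) = a ++ PySem.List.insertBy before x b := by
  induction a with
  | nil => simp
  | cons y ys ih =>
    have hy : before x y = false := h y (by simp)
    cases b with
    | nil =>
      simp only [List.cons_append, PySem.List.insertBy, hy, Bool.false_eq_true, if_false]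
      rw [ih (fun z hz => h z (by simp [hz]))]
      simp [PySem.List.insertBy]
    | cons z zs =>
      simp only [List.cons_append, PySem.List.insertBy, hy, Bool.false_eq_true, if_false]
      rw [ih (fun z hz => h z (by simp [hz]))]
      simp [PySem.List.insertBy]

theorem pvSorted_partition (xs : List String) :
    PySem.List.sorted xs (fun d => if pvP d then (0 : Int) else 1) false
      = xs.filter pvP ++ xs.filter (fun d => !pvP d) := by
  rw [PySem.List.sorted_eq_foldl_insertBy]
  suffices h : ∀ (a b : List String), (∀ y ∈ a, pvP y = true) → (∀ y ∈ b, pvP y = false) →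
      xs.foldl (fun acc x =>
        PySem.List.insertBy (fun p q =>
          decide ((if pvP p then (0 : Int) else 1) < (if pvP q then (0 : Int) else 1))) x acc)
        (a ++ b)
      = (a ++ xs.filter pvP) ++ (b ++ xs.filter (fun d => !pvP d)) by
    simpa using h [] [] (by simp) (by simp)
  induction xs with
  | nil => intro a b _ _; simp
  | cons x xs ih =>
    intro a b ha hb
    rw [List.foldl_cons]
    by_cases hx : pvP x = true
    · have hins : PySem.List.insertBy (fun p q =>
          decide ((if pvP p then (0 : Int) else 1) < (if pvP q then (0 : Int) else 1))) x (a ++ b)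
          = (a ++ [x]) ++ b := by
        rw [pvInsertBy_append_left _ _ a b
          (fun y hy => by simp [hx, ha y hy])]
        cases b with
        | nil => simp [PySem.List.insertBy]
        | cons z zs =>
          have hz : pvP z = false := hb z (by simp)
          simp [PySem.List.insertBy, hx, hz]
      rw [hins, ih (a ++ [x]) b (by
            intro y hy
            rcases List.mem_append.1 hy with h | h
            · exact ha y h
            · simp only [List.mem_singleton] at h; rw [h]; exact hx) hb]
      simp [hx]
    · have hx' : pvP x = false := by
        cases hh : pvP x with
        | false => rfl
        | true => exact absurd hh hx
      have hins : PySem.List.insertBy (fun p q =>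
          decide ((if pvP p then (0 : Int) else 1) < (if pvP q then (0 : Int) else 1))) x (a ++ b)
          = (a ++ b) ++ [x] := by
        apply PySem.List.insertBy_of_forall_not_before
        intro y _
        simp only [hx', Bool.false_eq_true, if_false]
        split <;> simp
      rw [hins, List.append_assoc a b [x],
          ih a (b ++ [x]) ha (by
            intro y hy
            rcases List.mem_append.1 hy with h | h
            · exact hb y h
            · simp only [List.mem_singleton] at h; rw [h]; exact hx')]
      simp [hx']

-- ===== VERDICT (by name: the statement is the Claim_ definition above) =====
theorem merge_smts_spec : Claim_equal_merge_smts := by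
  intro model_smt sentence_smt _
  unfold Spec_merge_smts
  simp only [merge_smts, merge_smts_alt, mergeB_src]
  rw [pvExtract_eq model_smt, pvExtract_eq sentence_smt]
  set Lm := PySem.Str.splitlines (PySem.Str.strip model_smt) with hLm
  set Ls := PySem.Str.splitlines (PySem.Str.strip sentence_smt) with hLs
  rw [pvLines_fold Lm PySem.Set.empty [] [] []]
  rw [pvLines_fold Ls _ _ _]
  rw [pvBfold_eq (pvDecls Lm) PySem.Set.empty [] []]
  rw [pvBfold_eq (pvDecls Ls) _ _ _]
  rw [show (fun d => if PySem.Str.isIn "(declare-sort" d then (0 : Int) else 1)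
      = (fun d => if pvP d then (0 : Int) else 1) from rfl]
  rw [List.foldl_append, pvDedup_acc (pvDecls Ls)
        ((pvDecls Lm).foldl pvDstep (PySem.Set.empty, [])).1
        ((pvDecls Lm).foldl pvDstep (PySem.Set.empty, [])).2]
  rw [pvSorted_partition]
  simp [List.filter_append]
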